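-- pv_equiv track=rewrite | github.com/ros-industrial-attic/robodk_postprocessors | Universal_Robots_SCRIPT.py | get_safe_name
-- ===== SOURCE A (Python) =====
-- def get_safe_name(progname):
--     """Get a safe program name"""
--     for c in r'-[]/\;,><&*:%=+@!#^()|?^':
--         progname = progname.replace(c,'')
--     if len(progname) <= 0:
--         progname = 'Program'
--     if progname[0].isdigit():
--         progname = 'P' + progname
--     return progname
-- ===== SOURCE B (Python) =====
-- _BAD = set(r'-[]/\;,><&*:%=+@!#^()|?^')
--
-- def get_safe_name(progname):
--     """Get a safe program name"""
--     progname = ''.join(c for c in progname if c not in _BAD)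
--     if len(progname) <= 0:
--         progname = 'Program'
--     if progname[0].isdigit():
--         progname = 'P' + progname
--     return progname
-- ===== Notes on version B (the rewrite author's own statement) =====
-- stated objective: simpler
-- what changed: B replaces the ~30 whole-string .replace rescans with one membership-filter pass over the input using a precomputed set of forbidden characters.
import Mathlib
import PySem

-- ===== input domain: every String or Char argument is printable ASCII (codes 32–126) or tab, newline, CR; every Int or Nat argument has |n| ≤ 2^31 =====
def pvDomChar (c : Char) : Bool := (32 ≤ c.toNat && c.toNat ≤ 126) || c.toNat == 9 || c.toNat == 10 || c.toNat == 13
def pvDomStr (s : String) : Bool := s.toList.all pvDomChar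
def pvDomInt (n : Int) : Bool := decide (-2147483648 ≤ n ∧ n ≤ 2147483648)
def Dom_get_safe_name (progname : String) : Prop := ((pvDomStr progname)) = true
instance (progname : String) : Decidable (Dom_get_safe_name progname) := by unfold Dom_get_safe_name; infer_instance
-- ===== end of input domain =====

-- B strips the forbidden characters in ONE filtering pass with a precomputed set instead of ~30 whole-string replace rescans (objective: simpler).

-- ===== PORT A =====
-- the characters of the raw literal r'-[]/\;,><&*:%=+@!#^()|?^', in order
def pvBadLit : List Char := "-[]/\\;,><&*:%=+@!#^()|?^".toList

-- for c in r'…': progname = progname.replace(c, '')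
def pvStripA (progname : String) : String :=
  pvBadLit.foldl (fun s c => PySem.Str.replace s (String.ofList [c]) "") progname

-- if len(progname) <= 0: progname = 'Program'
def pvFixEmptyA (p : String) : String := if PySem.Str.len p ≤ 0 then "Program" else p

def get_safe_name (progname : String) : String :=
  -- if progname[0].isdigit(): progname = 'P' + progname
  match PySem.Str.pyGet? (pvFixEmptyA (pvStripA progname)) 0 with
  | some c =>
    if PySem.Chars.isdigit c then "P" ++ pvFixEmptyA (pvStripA progname)
    else pvFixEmptyA (pvStripA progname)
  | none => pvFixEmptyA (pvStripA progname)  -- unreachable: the string is nonempty here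

-- ===== PORT B =====
def pvBadSet : PySem.Set Char := PySem.Set.ofList pvBadLit

-- ''.join(c for c in progname if c not in _BAD)
def pvStripB (progname : String) : List Char :=
  progname.toList.filter (fun c => !(pvBadSet.contains c))

-- if progname[0].isdigit(): progname = 'P' + progname   (on the char list, head first)
def pvDigitFixB (l : List Char) : String :=
  match l with
  | [] => String.ofList l  -- unreachable
  | c :: _ => if PySem.Chars.isdigit c then String.ofList ('P' :: l) else String.ofList l

def get_safe_name_alt (progname : String) : String :=
  pvDigitFixB (if (pvStripB progname).isEmpty then "Program".toList else pvStripB progname)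

-- ===== PRECONDITION & SPEC =====
def Spec_get_safe_name (progname : String) (out : String) : Prop := out = get_safe_name_alt progname
instance (progname : String) (out : String) : Decidable (Spec_get_safe_name progname out) := by unfold Spec_get_safe_name; infer_instance

-- ===== CLAIM (what is proved, stated in full; the proofs are below) =====
def Claim_equal_get_safe_name : Prop := ∀ (progname : String), Dom_get_safe_name progname → Spec_get_safe_name progname (get_safe_name progname)

-- ===== LEMMAS AND PROOFS =====

-- replacing a single character by '' is filtering it out
lemma replace_go_single (c : Char) : ∀ (fuel : Nat) (l acc : List Char), l.length ≤ fuel →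
    PySem.Chars.replace.go [c] [] fuel l acc = acc.reverse ++ l.filter (· != c) := by
  intro fuel
  induction fuel with
  | zero =>
    intro l acc h
    have hnil : l = [] := List.eq_nil_of_length_eq_zero (Nat.le_zero.1 h)
    subst hnil
    rw [PySem.Chars.replace.go.eq_def]
    simp
  | succ n ih =>
    intro l acc h
    cases l with
    | nil => rw [PySem.Chars.replace.go.eq_def]; simp
    | cons x t =>
      have hstep : PySem.Chars.replace.go [c] [] (n + 1) (x :: t) acc
          = if [c].isPrefixOf (x :: t) then
              PySem.Chars.replace.go [c] [] n (List.drop [c].length (x :: t)) ([].reverse ++ acc)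
            else PySem.Chars.replace.go [c] [] n t (x :: acc) := by
        rw [PySem.Chars.replace.go.eq_def]
      rw [hstep]
      by_cases hx : x = c
      · subst hx
        rw [if_pos (by simp [List.isPrefixOf])]
        rw [ih _ _ (by simpa using Nat.le_of_succ_le_succ h)]
        simp
      · rw [if_neg (by simp [List.isPrefixOf]; exact fun h' => absurd h'.symm hx)]
        rw [ih _ _ (by simpa using Nat.le_of_succ_le_succ h)]
        simp [hx]

lemma replace_single (c : Char) (l : List Char) :
    PySem.Chars.replace l [c] [] = l.filter (· != c) := by
  simp only [PySem.Chars.replace, List.isEmpty_cons, Bool.false_eq_true, if_false]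
  simpa using replace_go_single c l.length l [] le_rfl

-- folding single-char removals over `bad` filters out membership in `bad`
lemma foldl_replace_eq_filter (bad : List Char) : ∀ (l : List Char),
    bad.foldl (fun s c => PySem.Chars.replace s [c] []) l
      = l.filter (fun c => !(bad.contains c)) := by
  induction bad with
  | nil => intro l; simp
  | cons b bs ih =>
    intro l
    rw [List.foldl_cons, replace_single, ih, List.filter_filter]
    congr 1
    funext x
    rw [Bool.eq_iff_iff]
    simp [bne, Bool.and_comm]

lemma strip_eq (p : String) : (pvStripA p).toList = pvStripB p := by
  unfold pvStripA pvStripB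
  have h : ∀ (l : List Char) (s : String),
      (l.foldl (fun s c => PySem.Str.replace s (String.ofList [c]) "") s).toList
        = l.foldl (fun t c => PySem.Chars.replace t [c] []) s.toList := by
    intro l
    induction l with
    | nil => intro s; rfl
    | cons x xs ih =>
      intro s
      simp only [List.foldl_cons, ih]
      congr 1
      simp [PySem.Str.replace]
  rw [h, foldl_replace_eq_filter]
  congr 1
  funext c
  have hcon : pvBadSet.contains c = pvBadLit.contains c := by
    rw [Bool.eq_iff_iff]
    exact ((PySem.Set.contains_iff _ _).trans (PySem.Set.mem_ofList _ _)).trans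
      (List.contains_iff_mem).symm
  rw [hcon]

-- ===== VERDICT (by name: the statement is the Claim_ definition above) =====
theorem get_safe_name_spec : Claim_equal_get_safe_name := by
  intro progname _
  unfold Spec_get_safe_name get_safe_name get_safe_name_alt
  have hP : pvStripA progname = String.ofList (pvStripB progname) := by
    calc pvStripA progname = String.ofList (pvStripA progname).toList := String.ofList_toList.symm
      _ = String.ofList (pvStripB progname) := by rw [strip_eq]
  rw [hP]
  cases pvStripB progname with
  | nil => decide
  | cons c t =>
    have hfix : pvFixEmptyA (String.ofList (c :: t)) = String.ofList (c :: t) := by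
      unfold pvFixEmptyA
      rw [if_neg (by simp [PySem.Str.len])]
    rw [hfix]
    have hget : PySem.Str.pyGet? (String.ofList (c :: t)) 0 = some c := by
      simp [PySem.Str.pyGet?, PySem.Chars.pyGet?, PySem.List.pyGet?, PySem.List.pyIdx?]
    rw [hget]
    simp only [List.isEmpty_cons, Bool.false_eq_true, if_false]
    have hB : pvDigitFixB (c :: t)
        = if PySem.Chars.isdigit c then String.ofList ('P' :: c :: t)
          else String.ofList (c :: t) := rfl
    rw [hB]
    split_ifs with hd
    · rw [← String.ofList_append]
      rfl
    · rfl
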